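-- pv_equiv track=rewrite | github.com/ZelateCalcite/Small-Tools | 23_Python_programming_preparation/21.4.py | find_half
-- ===== SOURCE A (Python) =====
-- import collections
--
-- def find_half(li):
--     d = collections.Counter(map(tuple, li))
--     n = len(li) >> 1
--     ans = []
--     for k, v in d.items():
--         if v > n:
--             ans.append(set(k))
--     return ans if ans else None
-- ===== SOURCE B (Python) =====
-- def find_half(li):
--     # Boyer-Moore majority vote: at most one row can appear more than len(li)>>1 times.
--     cand = None
--     cnt = 0
--     for row in li:
--         t = tuple(row)
--         if cnt == 0:
--             cand, cnt = t, 1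
--         elif t == cand:
--             cnt += 1
--         else:
--             cnt -= 1
--     if cnt > 0 and sum(1 for row in li if tuple(row) == cand) > len(li) >> 1:
--         return [set(cand)]
--     return None
-- ===== Notes on version B (the rewrite author's own statement) =====
-- stated objective: alternative
-- what changed: Replaced the Counter dictionary plus filter over its items by a single-pass Boyer-Moore majority vote (candidate + counter) followed by one verification count, exploiting that at most one row can appear more than len(li)>>1 times.
import Mathlib
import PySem

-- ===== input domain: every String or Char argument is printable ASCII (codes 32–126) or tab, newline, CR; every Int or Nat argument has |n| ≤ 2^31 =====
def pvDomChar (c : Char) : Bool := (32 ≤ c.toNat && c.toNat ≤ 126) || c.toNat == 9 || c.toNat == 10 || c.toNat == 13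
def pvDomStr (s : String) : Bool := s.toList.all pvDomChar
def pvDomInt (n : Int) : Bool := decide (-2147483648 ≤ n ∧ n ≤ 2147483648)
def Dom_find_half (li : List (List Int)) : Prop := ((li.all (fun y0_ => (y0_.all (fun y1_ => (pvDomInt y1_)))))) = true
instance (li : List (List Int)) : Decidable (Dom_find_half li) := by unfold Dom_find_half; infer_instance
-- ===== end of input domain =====

-- B replaces the Counter-then-filter pass by a Boyer–Moore majority vote (single candidate + count)
-- with one verification count; same result, no dictionary built (objective: alternative).

-- ===== PORT A =====
def find_half (li : List (List Int)) : Option (List (List Int)) :=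
  -- d = collections.Counter(map(tuple, li)); rows are tuples of ints -> keys of type List Int
  let d : PySem.Dict (List Int) Int := PySem.Dict.counter li
  -- n = len(li) >> 1
  let n : Int := (li.length : Int) >>> (1 : Nat)
  -- for k, v in d.items(): if v > n: ans.append(set(k))
  let ans : List (List Int) :=
    d.items.foldl (fun ans kv => if kv.2 > n then ans ++ [PySem.Set.ofList kv.1] else ans) []
  -- return ans if ans else None
  if ans = [] then none else some ans

-- ===== PORT B =====
-- one step of the vote loop body (cand, cnt) over the next row's tuple t
def bmStep (s : Option (List Int) × Int) (t : List Int) : Option (List Int) × Int :=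
  if s.2 = 0 then (some t, 1)
  else if some t = s.1 then (s.1, s.2 + 1)
  else (s.1, s.2 - 1)

def find_half_alt (li : List (List Int)) : Option (List (List Int)) :=
  -- cand = None; cnt = 0; for row in li: ...
  let st : Option (List Int) × Int := li.foldl bmStep (none, 0)
  let n : Int := (li.length : Int) >>> (1 : Nat)
  -- if cnt > 0 and sum(1 for row in li if tuple(row) == cand) > len(li) >> 1: return [set(cand)]
  if st.2 > 0 then
    match st.1 with
    | some c => if (li.count c : Int) > n then some [PySem.Set.ofList c] else none
    | none => none
  else none

-- ===== PRECONDITION & SPEC =====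
def Spec_find_half (li : List (List Int)) (out : Option (List (List Int))) : Prop := out = find_half_alt li
instance (li : List (List Int)) (out : Option (List (List Int))) : Decidable (Spec_find_half li out) := by unfold Spec_find_half; infer_instance

-- ===== CLAIM (what is proved, stated in full; the proofs are below) =====
def Claim_equal_find_half : Prop := ∀ (li : List (List Int)), Dom_find_half li → Spec_find_half li (find_half li)

-- ===== LEMMAS AND PROOFS =====

lemma pv_shift_one (m : Nat) : ((m : Int) >>> (1 : Nat)) = ((m / 2 : Nat) : Int) := by
  rw [Int.shiftRight_eq_div_pow, Int.natCast_div]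

lemma pv_count_add_count_le (a b : List Int) (l : List (List Int)) (h : a ≠ b) :
    l.count a + l.count b ≤ l.length := by
  induction l with
  | nil => simp
  | cons x xs ih =>
    simp only [List.count_cons, List.length_cons, beq_iff_eq]
    by_cases h1 : x = a <;> by_cases h2 : x = b
    · exact absurd (h1.symm.trans h2) h
    · rw [if_pos h1, if_neg h2]; omega
    · rw [if_neg h1, if_pos h2]; omega
    · rw [if_neg h1, if_neg h2]; omega

lemma pv_nodup_all_eq_singleton {α : Type} (l : List α) (r : α) (hnd : l.Nodup)
    (hr : r ∈ l) (hall : ∀ x ∈ l, x = r) : l = [r] := by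
  cases l with
  | nil => cases hr
  | cons x xs =>
    have hx : x = r := hall x (List.mem_cons_self ..)
    subst hx
    cases xs with
    | nil => rfl
    | cons y ys =>
      have hy : y = x := hall y (by simp)
      subst hy
      simp at hnd

-- the Boyer–Moore invariant for the vote fold of B
lemma pv_bm_inv (l : List (List Int)) :
    0 ≤ (l.foldl bmStep (none, 0)).2 ∧
    ((l.foldl bmStep (none, 0)).1 = none → (l.foldl bmStep (none, 0)).2 = 0) ∧
    (∀ x : List Int, 2 * (l.count x : Int) ≤ (l.length : Int) +
      (if (l.foldl bmStep (none, 0)).1 = some x then (l.foldl bmStep (none, 0)).2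
       else -(l.foldl bmStep (none, 0)).2)) := by
  induction l using List.reverseRecOn with
  | nil => simp
  | append_singleton xs a ih =>
    rcases hst : xs.foldl bmStep (none, 0) with ⟨c, k⟩
    rw [hst] at ih
    obtain ⟨hk0, hcn, hcnt⟩ := ih
    rw [List.foldl_append]
    rw [hst]
    simp only [List.foldl_cons, List.foldl_nil]
    have hcount : ∀ x : List Int, (xs ++ [a]).count x = xs.count x + (if a = x then 1 else 0) := by
      intro x
      simp [List.count_append, List.count_singleton, beq_iff_eq]
    have hlen : ((xs ++ [a]).length : Int) = (xs.length : Int) + 1 := by simp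
    by_cases hk : k = 0
    · have hstep : bmStep (c, k) a = (some a, 1) := by simp [bmStep, hk]
      rw [hstep]
      refine ⟨by omega, by simp, ?_⟩
      intro x
      have h2 := hcnt x
      rw [hcount x, hlen]
      by_cases hax : a = x
      · subst hax
        rw [if_pos rfl, if_pos rfl]
        rw [hk] at h2
        split_ifs at h2 <;> push_cast <;> omega
      · rw [if_neg (fun h => hax (Option.some.inj h)), if_neg hax]
        rw [hk] at h2
        split_ifs at h2 <;> push_cast <;> omega
    · by_cases hac : some a = c
      · have hstep : bmStep (c, k) a = (c, k + 1) := by simp [bmStep, hk, hac]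
        rw [hstep]
        refine ⟨by omega, fun h => absurd (hcn h) hk, ?_⟩
        intro x
        have h2 := hcnt x
        rw [hcount x, hlen]
        by_cases hcx : c = some x
        · rw [if_pos hcx] at h2
          rw [if_pos hcx]
          have hax : a = x := Option.some.inj (hac.trans hcx)
          rw [if_pos hax]
          push_cast; omega
        · rw [if_neg hcx] at h2
          rw [if_neg hcx]
          have hax : ¬ a = x := fun h => hcx (hac ▸ (h ▸ rfl))
          rw [if_neg hax]
          push_cast; omega
      · have hstep : bmStep (c, k) a = (c, k - 1) := by simp [bmStep, hk, hac]
        rw [hstep]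
        have hkpos : 0 < k := by
          rcases lt_or_eq_of_le hk0 with h | h
          · exact h
          · exact absurd h.symm hk
        refine ⟨by omega, fun h => absurd (hcn h) hk, ?_⟩
        intro x
        have h2 := hcnt x
        rw [hcount x, hlen]
        by_cases hcx : c = some x
        · rw [if_pos hcx] at h2
          rw [if_pos hcx]
          have hax : ¬ a = x := fun h => hac (h ▸ hcx.symm)
          rw [if_neg hax]
          push_cast; omega
        · rw [if_neg hcx] at h2
          rw [if_neg hcx]
          by_cases hax : a = x
          · rw [if_pos hax]; push_cast; omega
          · rw [if_neg hax]; push_cast; omega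

-- A's loop over the Counter's items, as a filter of the distinct rows
lemma pv_a_ans (li : List (List Int)) (n : Int) :
    ((PySem.Dict.counter li : PySem.Dict (List Int) Int).items.foldl
      (fun ans kv => if kv.2 > n then ans ++ [PySem.Set.ofList kv.1] else ans) []) =
    ((PySem.Set.ofList li).filter (fun k => decide (n < (li.count k : Int)))).map
      (fun k => PySem.Set.ofList k) := by
  rw [PySem.Dict.items_counter]
  rw [show (fun (ans : List (List Int)) (kv : List Int × Int) =>
        if kv.2 > n then ans ++ [PySem.Set.ofList kv.1] else ans) =
      (fun ans kv => if (fun (kv : List Int × Int) => decide (n < kv.2)) kv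
        then ans ++ [(fun (kv : List Int × Int) => PySem.Set.ofList kv.1) kv] else ans) from by
    funext ans kv; by_cases h : n < kv.2 <;> simp [h]]
  rw [PySem.List.foldl_append_if]
  rw [List.filter_map, List.map_map]
  simp only [Function.comp_def]
  rfl

-- majority threshold: v > len >> 1  ↔  2*v > len
lemma pv_thresh (len v : Nat) :
    (((len : Int) >>> (1 : Nat)) < (v : Int)) ↔ len < 2 * v := by
  rw [pv_shift_one]
  constructor
  · intro h
    have : len / 2 < v := by exact_mod_cast h
    omega
  · intro h
    have : len / 2 < v := by omega
    exact_mod_cast this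

-- ===== VERDICT (by name: the statement is the Claim_ definition above) =====
theorem find_half_spec : Claim_equal_find_half := by
  intro li _
  unfold Spec_find_half
  simp only [find_half, find_half_alt]
  rw [pv_a_ans]
  rcases hst : li.foldl bmStep (none, 0) with ⟨c, k⟩
  have hinv := pv_bm_inv li
  rw [hst] at hinv
  obtain ⟨hk0, hcn, hcnt⟩ := hinv
  by_cases hex : ∃ r ∈ li, ((li.length : Int) >>> (1 : Nat)) < (li.count r : Int)
  · obtain ⟨r, hr, hpr⟩ := hex
    have hmaj : li.length < 2 * li.count r := (pv_thresh _ _).mp hpr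
    -- B's candidate must be r, with positive count
    have hcr : c = some r := by
      by_contra hne
      have h2 := hcnt r
      rw [if_neg hne] at h2
      omega
    have hkpos : 0 < k := by
      rcases lt_or_eq_of_le hk0 with h | h
      · exact h
      · exfalso
        have h2 := hcnt r
        rw [hcr, if_pos rfl, ← h] at h2
        omega
    -- A's filtered distinct keys are exactly [r]
    have hF : ((PySem.Set.ofList li).filter
        (fun k => decide (((li.length : Int) >>> (1 : Nat)) < (li.count k : Int)))) = [r] := by
      apply pv_nodup_all_eq_singleton
      · exact List.Nodup.filter _ (PySem.Set.nodup_ofList li)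
      · rw [List.mem_filter]
        exact ⟨(PySem.Set.mem_ofList li r).mpr hr, by simpa using hpr⟩
      · intro x hx
        rw [List.mem_filter] at hx
        obtain ⟨hx1, hx2⟩ := hx
        have hxli : x ∈ li := (PySem.Set.mem_ofList li x).mp hx1
        by_contra hne
        have hxmaj : li.length < 2 * li.count x := (pv_thresh _ _).mp (by simpa using hx2)
        have := pv_count_add_count_le x r li hne
        omega
    rw [hF]
    simp only [List.map_cons, List.map_nil, hcr]
    rw [if_neg (by simp), if_pos hkpos, if_pos hpr]
  · have hnex : ∀ x ∈ li, ¬ (((li.length : Int) >>> (1 : Nat)) < (li.count x : Int)) := by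
      intro x hx h
      exact hex ⟨x, hx, h⟩
    have hF : ((PySem.Set.ofList li).filter
        (fun k => decide (((li.length : Int) >>> (1 : Nat)) < (li.count k : Int)))) = [] := by
      rw [List.filter_eq_nil_iff]
      intro x hx
      simp only [decide_eq_true_eq]
      exact hnex x ((PySem.Set.mem_ofList li x).mp hx)
    rw [hF]
    simp only [List.map_nil]
    by_cases hkpos : 0 < k
    · rw [if_pos hkpos]
      cases c with
      | none => simp
      | some cc =>
        have hnc : ¬ (((li.length : Int) >>> (1 : Nat)) < ((li.count cc : Nat) : Int)) := by
          intro h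
          have hpos : 0 < li.count cc := by
            have := (pv_thresh li.length (li.count cc)).mp h
            omega
          exact hnex cc (List.count_pos_iff.mp hpos) h
        simp [hnc]
    · rw [if_neg hkpos]; simp
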